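-- pv_equiv track=rewrite | github.com/graphbrain/graphbrain | graphbrain/semsim/utils.py | make_any_func_pattern
-- ===== SOURCE A (Python) =====
-- def make_any_func_pattern(words_and_vars: list[str],
--                           inner_funcs: list[str] | None = None,
--                           arg_roles: list[str] | None = None):
--
--     inner_patterns: list[str] = []
--     for wav in words_and_vars:
--         inner_patterns_ar: list[str] = []
--         if arg_roles:
--             for arg_role in arg_roles:
--                 inner_pattern_ar = f"{wav}/{arg_role}"
--                 inner_patterns_ar.append(inner_pattern_ar)
--         else:
--             inner_patterns_ar.append(wav)
--
--         for inner_pattern in inner_patterns_ar: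
--             if inner_funcs:
--                 for func in reversed(inner_funcs):
--                     inner_pattern = f"({func} {inner_pattern})"
--             inner_patterns.append(inner_pattern)
--
--     inner_patterns_joined = " ".join(inner_patterns)
--     return f"(any {inner_patterns_joined})"
-- ===== SOURCE B (Python) =====
-- def make_any_func_pattern(words_and_vars: list[str],
--                           inner_funcs: list[str] | None = None,
--                           arg_roles: list[str] | None = None):
--     funcs = inner_funcs if inner_funcs else []
--     prefix = ''.join(f'({func} ' for func in funcs)
--     suffix = ')' * len(funcs)
--     patterns = [prefix + base + suffix
--                 for wav in words_and_vars
--                 for base in ([f'{wav}/{role}' for role in arg_roles]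
--                              if arg_roles else [wav])]
--     return f"(any {' '.join(patterns)})"
-- ===== Notes on version B (the rewrite author's own statement) =====
-- stated objective: alternative
-- what changed: B precomputes the func wrapper once (prefix string and ')'*n suffix) and builds all patterns in a single flat comprehension, instead of A's nested loops that re-wrap each pattern by folding over reversed(inner_funcs) per item.
import Mathlib
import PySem

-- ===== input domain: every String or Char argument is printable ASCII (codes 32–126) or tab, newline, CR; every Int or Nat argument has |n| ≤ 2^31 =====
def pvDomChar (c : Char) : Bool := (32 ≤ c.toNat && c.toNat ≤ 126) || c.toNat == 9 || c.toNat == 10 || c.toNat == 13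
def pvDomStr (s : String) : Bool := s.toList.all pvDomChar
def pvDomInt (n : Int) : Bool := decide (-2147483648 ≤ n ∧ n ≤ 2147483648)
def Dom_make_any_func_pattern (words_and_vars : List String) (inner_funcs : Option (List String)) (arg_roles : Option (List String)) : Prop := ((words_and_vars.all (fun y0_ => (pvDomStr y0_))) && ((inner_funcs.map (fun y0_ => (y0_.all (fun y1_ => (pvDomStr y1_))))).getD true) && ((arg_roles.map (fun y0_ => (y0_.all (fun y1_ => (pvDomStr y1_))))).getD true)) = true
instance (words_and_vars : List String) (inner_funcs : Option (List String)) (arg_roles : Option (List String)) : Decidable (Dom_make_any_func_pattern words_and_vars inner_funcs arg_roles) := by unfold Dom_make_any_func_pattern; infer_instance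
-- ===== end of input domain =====

-- B precomputes the func wrapper once (prefix/suffix strings) and builds all patterns in one
-- flat pass, instead of A's nested loops that re-wrap each pattern over reversed(inner_funcs).


-- ===== PORT A =====
-- 'for func in reversed(inner_funcs): inner_pattern = f"({func} {inner_pattern})"'
def pvWrapA (inner_funcs : List String) (p : String) : String :=
  inner_funcs.reverse.foldl (fun inner_pattern func => "(" ++ func ++ " " ++ inner_pattern ++ ")") p

def make_any_func_pattern (words_and_vars : List String) (inner_funcs : Option (List String)) (arg_roles : Option (List String)) : String :=
  -- 'if arg_roles:' / 'if inner_funcs:' — None and [] are both falsy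
  let fs := inner_funcs.getD []
  let rs := arg_roles.getD []
  let inner_patterns : List String :=
    words_and_vars.foldl (fun acc wav =>
      let inner_patterns_ar : List String :=
        if rs ≠ [] then rs.foldl (fun a arg_role => a ++ [wav ++ "/" ++ arg_role]) []
        else [wav]
      inner_patterns_ar.foldl (fun acc2 inner_pattern =>
        acc2 ++ [if fs ≠ [] then pvWrapA fs inner_pattern else inner_pattern]) acc) []
  "(any " ++ PySem.Str.join " " inner_patterns ++ ")"

-- ===== PORT B =====
def make_any_func_pattern_alt (words_and_vars : List String) (inner_funcs : Option (List String)) (arg_roles : Option (List String)) : String :=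
  let funcs := inner_funcs.getD []
  let pre := String.join (funcs.map (fun func => "(" ++ func ++ " "))
  let suf := String.ofList (List.replicate funcs.length ')')
  let patterns : List String :=
    words_and_vars.flatMap (fun wav =>
      (if arg_roles.getD [] ≠ [] then (arg_roles.getD []).map (fun role => wav ++ "/" ++ role)
       else [wav]).map (fun base => pre ++ base ++ suf))
  "(any " ++ PySem.Str.join " " patterns ++ ")"

-- ===== PRECONDITION & SPEC =====
def Spec_make_any_func_pattern (words_and_vars : List String) (inner_funcs : Option (List String)) (arg_roles : Option (List String)) (out : String) : Prop := out = make_any_func_pattern_alt words_and_vars inner_funcs arg_roles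
instance (words_and_vars : List String) (inner_funcs : Option (List String)) (arg_roles : Option (List String)) (out : String) : Decidable (Spec_make_any_func_pattern words_and_vars inner_funcs arg_roles out) := by unfold Spec_make_any_func_pattern; infer_instance

-- ===== CLAIM (what is proved, stated in full; the proofs are below) =====
def Claim_equal_make_any_func_pattern : Prop := ∀ (words_and_vars : List String) (inner_funcs : Option (List String)) (arg_roles : Option (List String)), Dom_make_any_func_pattern words_and_vars inner_funcs arg_roles → Spec_make_any_func_pattern words_and_vars inner_funcs arg_roles (make_any_func_pattern words_and_vars inner_funcs arg_roles)

-- ===== LEMMAS AND PROOFS =====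
theorem pv_foldl_str (l : List String) : ∀ a b : String, l.foldl (· ++ ·) (a ++ b) = a ++ l.foldl (· ++ ·) b := by
  induction l with
  | nil => intro a b; rfl
  | cons h t ih => intro a b; simp only [List.foldl_cons, String.append_assoc, ih]

theorem pv_join_cons (s : String) (l : List String) : String.join (s :: l) = s ++ String.join l := by
  simp only [String.join, List.foldl_cons, String.empty_append]
  rw [← String.append_empty (s := s), pv_foldl_str]
  simp [String.append_empty]

-- A's reversed-funcs fold equals B's precomputed prefix/suffix wrapping.
theorem pv_wrap_eq (fs : List String) (p : String) :
    pvWrapA fs p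
      = String.join (fs.map (fun func => "(" ++ func ++ " ")) ++ p
          ++ String.ofList (List.replicate fs.length ')') := by
  induction fs with
  | nil =>
    simp only [pvWrapA, List.reverse_nil, List.foldl_nil, List.map_nil,
      List.length_nil, List.replicate_zero]
    rw [show String.ofList ([] : List Char) = "" by decide, show String.join [] = "" by decide,
      String.empty_append, String.append_empty]
  | cons f t ih =>
    simp only [pvWrapA, List.reverse_cons, List.foldl_append, List.foldl_cons, List.foldl_nil] at *
    rw [ih, List.map_cons, pv_join_cons, List.length_cons, List.replicate_succ',
        String.ofList_append]
    rw [show String.ofList [')'] = ")" by decide]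
    simp [String.append_assoc]

theorem make_any_func_pattern_eq (words_and_vars : List String) (inner_funcs : Option (List String)) (arg_roles : Option (List String)) :
    make_any_func_pattern words_and_vars inner_funcs arg_roles
      = make_any_func_pattern_alt words_and_vars inner_funcs arg_roles := by
  unfold make_any_func_pattern make_any_func_pattern_alt
  simp only [PySem.List.foldl_append_singleton_eq_map, List.nil_append]
  -- normalise A's outer fold to a flatMap
  have hA : ∀ (g : String → List String) acc,
      words_and_vars.foldl (fun acc wav => acc ++ g wav) acc = acc ++ words_and_vars.flatMap g :=
    fun g acc => PySem.List.foldl_append_eq_flatMap g words_and_vars acc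
  rw [hA, List.nil_append]
  congr 2
  congr 1
  refine List.flatMap_congr ?_
  intro wav _
  by_cases hr : arg_roles.getD [] = [] <;>
    by_cases hf : inner_funcs.getD [] = [] <;>
      simp [hr, hf, pv_wrap_eq, show String.join [] = "" by decide,
        show String.ofList ([] : List Char) = "" by decide]

-- ===== VERDICT (by name: the statement is the Claim_ definition above) =====
theorem make_any_func_pattern_spec : Claim_equal_make_any_func_pattern := by
  intro w f r _
  unfold Spec_make_any_func_pattern
  exact make_any_func_pattern_eq w f r
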